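-- pv_equiv track=rewrite | github.com/LuisChore/RandomizedAlgorithms | EventsAndProbability/PolynomialIdentity.py | evaluate_canonical_form
-- ===== SOURCE A (Python) =====
-- def evaluate_canonical_form(canonical_form,value):
--     answer = 0
--     canonical_form.reverse()
--     v = 1
--     for u in canonical_form:
--         answer = answer + v*u
--         v = value * v
--
--     canonical_form.reverse()
--     return answer
-- ===== SOURCE B (Python) =====
-- def evaluate_canonical_form(canonical_form, value):
--     # Horner's method: one pass in the original order, no reverse, no mutation.
--     answer = 0
--     for c in canonical_form:
--         answer = answer * value + c
--     return answer
-- ===== Notes on version B (the rewrite author's own statement) =====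
-- stated objective: idiomatic
-- what changed: Replaces the double in-place reverse plus an explicit running power with Horner's method: a single forward pass maintaining only the accumulator (answer = answer*value + c), leaving the argument unmodified.
import Mathlib
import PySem

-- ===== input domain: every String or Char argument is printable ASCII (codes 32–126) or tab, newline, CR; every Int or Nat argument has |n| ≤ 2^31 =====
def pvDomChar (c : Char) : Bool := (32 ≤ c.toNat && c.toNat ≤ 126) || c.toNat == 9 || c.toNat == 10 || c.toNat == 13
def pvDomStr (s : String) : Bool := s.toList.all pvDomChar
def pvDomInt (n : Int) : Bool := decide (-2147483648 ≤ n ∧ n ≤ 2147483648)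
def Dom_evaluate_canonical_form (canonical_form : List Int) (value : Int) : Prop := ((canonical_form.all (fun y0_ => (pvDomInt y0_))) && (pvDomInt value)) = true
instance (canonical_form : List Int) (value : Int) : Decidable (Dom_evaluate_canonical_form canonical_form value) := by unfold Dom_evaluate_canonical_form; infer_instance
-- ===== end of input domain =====

-- B replaces A's double in-place reverse + explicit running power with a single forward
-- Horner pass maintaining only the accumulator; return values are proved equal.
-- (A reverses its argument in place and reverses it back, so the net mutation is none.)

-- ===== PORT A =====
-- A: reverse, then fold carrying (answer, v) with answer += v*u, v = value*v; reverse back (no-op for the return value).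
def evaluate_canonical_form (canonical_form : List Int) (value : Int) : Int :=
  (canonical_form.reverse.foldl
    (fun (s : Int × Int) u => (s.1 + s.2 * u, value * s.2)) (0, 1)).1

-- ===== PORT B =====
-- B: Horner's method, one forward pass with a single accumulator.
def evaluate_canonical_form_alt (canonical_form : List Int) (value : Int) : Int :=
  canonical_form.foldl (fun answer c => answer * value + c) 0

-- ===== PRECONDITION & SPEC =====
def Spec_evaluate_canonical_form (canonical_form : List Int) (value : Int) (out : Int) : Prop := out = evaluate_canonical_form_alt canonical_form value
instance (canonical_form : List Int) (value : Int) (out : Int) : Decidable (Spec_evaluate_canonical_form canonical_form value out) := by unfold Spec_evaluate_canonical_form; infer_instance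

-- ===== CLAIM (what is proved, stated in full; the proofs are below) =====
def Claim_equal_evaluate_canonical_form : Prop := ∀ (canonical_form : List Int) (value : Int), Dom_evaluate_canonical_form canonical_form value → Spec_evaluate_canonical_form canonical_form value (evaluate_canonical_form canonical_form value)

-- ===== LEMMAS AND PROOFS =====

-- A's fold from state (a, v) adds v times the foldr-polynomial of the remaining list.
theorem evalA_foldl (l : List Int) (value a v : Int) :
    (l.foldl (fun (s : Int × Int) u => (s.1 + s.2 * u, value * s.2)) (a, v)).1
      = a + v * l.foldr (fun c r => c + value * r) 0 := by
  induction l generalizing a v with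
  | nil => simp
  | cons u t ih => simp [List.foldl, ih]; ring

-- ===== VERDICT (by name: the statement is the Claim_ definition above) =====
theorem evaluate_canonical_form_spec : Claim_equal_evaluate_canonical_form := by
  intro cf value _
  unfold Spec_evaluate_canonical_form evaluate_canonical_form evaluate_canonical_form_alt
  rw [evalA_foldl, List.foldr_reverse]
  have : cf.foldl (fun r c => c + value * r) 0
       = cf.foldl (fun answer c => answer * value + c) 0 := by
    congr 1; funext r c; ring
  rw [this]; ring
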